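-- pv_equiv track=rewrite | github.com/inesimoes01/wsp-quality-assessment-vision | src/Segmentation/dataset/pre-annotation/cellpose_to_label_studio.py | find_unclosed_contours
-- ===== SOURCE A (Python) =====
-- def find_unclosed_contours(contours):
--     unclosed_contours = []
--     for contour in contours:
--         points_set = set()
--         for point in contour:
--             point_tuple = tuple(point[0])
--             if point_tuple in points_set:
--                 unclosed_contours.append(contour)
--                 break
--             points_set.add(point_tuple)
--     return unclosed_contours
-- ===== SOURCE B (Python) =====
-- def _has_duplicate_point(contour):
--     # quadratic earlier-index scan: point i duplicates some point j < i
--     return any(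
--         any(tuple(contour[j][0]) == tuple(contour[i][0]) for j in range(i))
--         for i in range(len(contour))
--     )
--
--
-- def find_unclosed_contours(contours):
--     return [contour for contour in contours if _has_duplicate_point(contour)]
-- ===== Notes on version B (the rewrite author's own statement) =====
-- stated objective: alternative
-- what changed: Replaces the incremental hash-set membership loop with a filter comprehension whose per-contour test is a quadratic earlier-index pairwise comparison of the point keys (no set is maintained).
import Mathlib
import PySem

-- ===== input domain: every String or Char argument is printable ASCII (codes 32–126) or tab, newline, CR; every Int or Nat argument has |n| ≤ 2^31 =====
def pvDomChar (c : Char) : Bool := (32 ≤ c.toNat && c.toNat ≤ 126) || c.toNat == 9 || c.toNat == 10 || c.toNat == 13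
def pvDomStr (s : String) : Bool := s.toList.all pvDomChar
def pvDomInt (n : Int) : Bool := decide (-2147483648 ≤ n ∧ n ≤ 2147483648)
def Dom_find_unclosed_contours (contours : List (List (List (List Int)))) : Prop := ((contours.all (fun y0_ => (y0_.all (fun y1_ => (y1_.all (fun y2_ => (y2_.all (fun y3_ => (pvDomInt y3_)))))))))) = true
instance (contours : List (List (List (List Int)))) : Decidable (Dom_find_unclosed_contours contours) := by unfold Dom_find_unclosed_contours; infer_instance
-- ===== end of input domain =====

-- B replaces the incremental hash-set duplicate scan with a quadratic
-- earlier-index pairwise comparison driving a filter comprehension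
-- (alternative decomposition; not faster). Return-value equivalence only.

-- the key of one point, tuple(point[0]); point[0] raises IndexError on an
-- empty point (such inputs are outside Pre_ exactly where a port reaches them)
def pvKey (point : List (List Int)) : List Int := (PySem.List.pyGet? point 0).getD []

-- ===== PORT A =====
-- inner 'for point in contour' loop: break appends the contour and stops
def pvAInner (contour : List (List (List Int))) (points : List (List (List Int)))
    (pointsSet : PySem.Set (List Int)) (acc : List (List (List (List Int)))) :
    List (List (List (List Int))) :=
  match points with
  | [] => acc
  | point :: rest =>
    let pointTuple := pvKey point
    if pointsSet.contains pointTuple then acc ++ [contour]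
    else pvAInner contour rest (pointsSet.add pointTuple) acc

def find_unclosed_contours (contours : List (List (List (List Int)))) :
    List (List (List (List Int))) :=
  contours.foldl (fun acc contour => pvAInner contour contour PySem.Set.empty acc) []

-- ===== PORT B =====
-- tuple(contour[m][0]) for an index m produced by range
def pvKeyAt (contour : List (List (List Int))) (m : Int) : List Int :=
  pvKey ((PySem.List.pyGet? contour m).getD [])

def pvHasDuplicatePoint (contour : List (List (List Int))) : Bool :=
  (PySem.List.pyRange 0 contour.length 1).any (fun i =>
    (PySem.List.pyRange 0 i 1).any (fun j => pvKeyAt contour j == pvKeyAt contour i))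

def find_unclosed_contours_alt (contours : List (List (List (List Int)))) :
    List (List (List (List Int))) :=
  contours.filter (fun contour => pvHasDuplicatePoint contour)

-- ===== PRECONDITION & SPEC =====
-- Pre_ excludes exactly the inputs on which the Python A raises IndexError:
-- a contour with an empty point that is not preceded by a duplicate pair
-- (A breaks out of the contour at the first duplicated point, so an empty
-- point after such a pair is never touched and A still returns).
def Pre_find_unclosed_contours (contours : List (List (List (List Int)))) : Prop :=
  ∀ c ∈ contours, ∀ i ∈ List.range c.length, c.getD i [] = [] →
    ∃ d ∈ List.range i, ∃ j ∈ List.range d, pvKey (c.getD j []) = pvKey (c.getD d [])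
instance (contours : List (List (List (List Int)))) : Decidable (Pre_find_unclosed_contours contours) := by unfold Pre_find_unclosed_contours; infer_instance

def pvWitness_find_unclosed_contours : List (List (List (List Int))) :=
  [[[[0, 0]], [[1, 2]], [[0, 0]]], [[[3]]]]

def Spec_find_unclosed_contours (contours : List (List (List (List Int)))) (out : List (List (List (List Int)))) : Prop := out = find_unclosed_contours_alt contours
instance (contours : List (List (List (List Int)))) (out : List (List (List (List Int)))) : Decidable (Spec_find_unclosed_contours contours out) := by unfold Spec_find_unclosed_contours; infer_instance

-- ===== CLAIM (what is proved, stated in full; the proofs are below) =====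
def Claim_equal_find_unclosed_contours : Prop := ∀ (contours : List (List (List (List Int)))), Dom_find_unclosed_contours contours → Pre_find_unclosed_contours contours → Spec_find_unclosed_contours contours (find_unclosed_contours contours)

-- ===== LEMMAS AND PROOFS =====

-- the inner loop of A appends the contour iff the keys seen so far collide
lemma pvAInner_eq (c : List (List (List Int))) (pts : List (List (List Int)))
    (s : PySem.Set (List Int)) (hs : s.Nodup) (acc : List (List (List (List Int)))) :
    pvAInner c pts s acc =
      if ((s : List (List Int)) ++ pts.map pvKey).Nodup then acc else acc ++ [c] := by
  induction pts generalizing s with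
  | nil => simp [pvAInner, hs]
  | cons p rest ih =>
    simp only [pvAInner, List.map_cons]
    by_cases hmem : pvKey p ∈ s
    · have hc : s.contains (pvKey p) = true := by
        simpa [PySem.Set.contains] using hmem
      rw [hc]
      have hnot : ¬ ((s : List (List Int)) ++ pvKey p :: rest.map pvKey).Nodup := by
        intro h
        exact (List.nodup_append.mp h).2.2 (pvKey p) hmem (pvKey p) List.mem_cons_self rfl
      simp [hnot]
    · have hc : s.contains (pvKey p) = false := by
        simp only [PySem.Set.contains, List.contains_eq_mem, decide_eq_false_iff_not]
        exact hmem
      rw [hc]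
      have hadd : s.add (pvKey p) = s ++ [pvKey p] := by
        simp only [PySem.Set.add, hc, Bool.false_eq_true, if_false]
      have hnd : (s.add (pvKey p)).Nodup := PySem.Set.nodup_add s _ hs
      simp only [Bool.false_eq_true, if_false]
      rw [ih (s.add (pvKey p)) hnd, hadd]
      simp [List.append_assoc]

-- folding "append unless nodup" is a filter
lemma pvFoldl_filter (l : List (List (List (List Int)))) (acc : List (List (List (List Int)))) :
    l.foldl (fun acc c => if ((c.map pvKey)).Nodup then acc else acc ++ [c]) acc
      = acc ++ l.filter (fun c => ¬ (c.map pvKey).Nodup) := by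
  induction l generalizing acc with
  | nil => simp
  | cons c t ih =>
    by_cases h : ((c.map pvKey)).Nodup <;>
      simp [List.foldl_cons, h, ih, List.append_assoc]

-- a list fails Nodup iff some element equals an earlier one (getD form)
lemma pvNot_nodup_iff (l : List (List Int)) :
    (¬ l.Nodup) ↔ ∃ i < l.length, ∃ j < i, l.getD j [] = l.getD i [] := by
  constructor
  · intro h
    rw [List.Nodup, List.pairwise_iff_getElem] at h
    push Not at h
    obtain ⟨j, i, hj, hi, hji, heq⟩ := h
    refine ⟨i, hi, j, hji, ?_⟩
    rw [List.getD_eq_getElem l [] hj, List.getD_eq_getElem l [] hi]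
    simpa using heq
  · rintro ⟨i, hi, j, hji, heq⟩
    intro hnd
    rw [List.getD_eq_getElem l [] (hji.trans hi), List.getD_eq_getElem l [] hi] at heq
    exact absurd ((List.Nodup.getElem_inj_iff hnd).mp heq) (by omega)

-- B's per-contour test decides exactly "the keys are not all distinct"
lemma pvHasDup_iff (c : List (List (List Int))) :
    pvHasDuplicatePoint c = !decide ((c.map pvKey)).Nodup := by
  have key_at : ∀ m : Nat, m < c.length → pvKeyAt c (m : Int) = (c.map pvKey).getD m [] := by
    intro m hm
    unfold pvKeyAt
    rw [PySem.List.pyGet?_natCast, List.getElem?_eq_getElem hm,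
        List.getD_eq_getElem _ [] (by simpa using hm), List.getElem_map]
    rfl
  have hiff : pvHasDuplicatePoint c = true ↔
      ∃ i < (c.map pvKey).length, ∃ j < i,
        (c.map pvKey).getD j [] = (c.map pvKey).getD i [] := by
    unfold pvHasDuplicatePoint
    simp only [List.any_eq_true, PySem.List.mem_pyRange_one, beq_iff_eq]
    constructor
    · rintro ⟨i, ⟨hi0, hin⟩, j, ⟨hj0, hji⟩, heq⟩
      refine ⟨i.toNat, by simp; omega, j.toNat, by omega, ?_⟩
      have hi' : i.toNat < c.length := by omega
      have hj' : j.toNat < c.length := by omega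
      rw [← key_at i.toNat hi', ← key_at j.toNat hj']
      rw [Int.toNat_of_nonneg hi0, Int.toNat_of_nonneg hj0]
      exact heq
    · rintro ⟨i, hi, j, hji, heq⟩
      have hi' : i < c.length := by simpa using hi
      refine ⟨(i : Int), ⟨by omega, by exact_mod_cast hi'⟩,
              (j : Int), ⟨by omega, by exact_mod_cast hji⟩, ?_⟩
      rw [key_at i hi', key_at j (hji.trans hi')]
      exact heq.symm ▸ heq
  by_cases hn : ((c.map pvKey)).Nodup
  · have : pvHasDuplicatePoint c ≠ true := by
      intro h
      exact (pvNot_nodup_iff _).mpr (hiff.mp h) hn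
    simp [hn, Bool.eq_false_iff.mpr this]
  · simp [hn, hiff.mpr ((pvNot_nodup_iff _).mp hn)]

-- ===== VERDICT (by name: the statement is the Claim_ definition above) =====
theorem find_unclosed_contours_spec : Claim_equal_find_unclosed_contours := by
  intro contours _ _
  unfold Spec_find_unclosed_contours find_unclosed_contours find_unclosed_contours_alt
  rw [List.foldl_ext _ (fun acc c => if ((c.map pvKey)).Nodup then acc else acc ++ [c]) []
      (fun acc c _ => by
        rw [pvAInner_eq c c PySem.Set.empty (by simp [PySem.Set.empty]) acc]
        simp [PySem.Set.empty])]
  rw [pvFoldl_filter]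
  simp only [List.nil_append]
  apply List.filter_congr
  intro c _
  rw [pvHasDup_iff]
  by_cases h : ((c.map pvKey)).Nodup <;> simp [h]
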